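-- pv_equiv track=rewrite | github.com/chouvinc/VEEP-Summer-Project | data_display/io/gs_import.py | copy_without_columns
-- ===== SOURCE A (Python) =====
-- def copy_without_columns(arr, indices_set):
--     new_table = []
--
--     for i in range(1, len(arr)):
--         new_row = []
--         for j in range(len(arr[i])):
--             if j in indices_set:
--                 new_row.append(arr[i][j])
--         new_table.append(new_row)
--
--     return new_table
-- ===== SOURCE B (Python) =====
-- def copy_without_columns(arr, indices_set):
--     kept = [j for j in sorted(set(indices_set)) if j >= 0]
--     new_table = []
--     for row in arr[1:]:
--         n = len(row)
--         new_row = []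
--         for j in kept:
--             if j >= n:
--                 break
--             new_row.append(row[j])
--         new_table.append(new_row)
--     return new_table
-- ===== Notes on version B (the rewrite author's own statement) =====
-- stated objective: alternative
-- what changed: B sorts the distinct non-negative selected indices once and iterates each data row over that sorted index list, breaking at the first index past the row's length, instead of scanning every column and testing list membership per column.
import Mathlib
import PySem

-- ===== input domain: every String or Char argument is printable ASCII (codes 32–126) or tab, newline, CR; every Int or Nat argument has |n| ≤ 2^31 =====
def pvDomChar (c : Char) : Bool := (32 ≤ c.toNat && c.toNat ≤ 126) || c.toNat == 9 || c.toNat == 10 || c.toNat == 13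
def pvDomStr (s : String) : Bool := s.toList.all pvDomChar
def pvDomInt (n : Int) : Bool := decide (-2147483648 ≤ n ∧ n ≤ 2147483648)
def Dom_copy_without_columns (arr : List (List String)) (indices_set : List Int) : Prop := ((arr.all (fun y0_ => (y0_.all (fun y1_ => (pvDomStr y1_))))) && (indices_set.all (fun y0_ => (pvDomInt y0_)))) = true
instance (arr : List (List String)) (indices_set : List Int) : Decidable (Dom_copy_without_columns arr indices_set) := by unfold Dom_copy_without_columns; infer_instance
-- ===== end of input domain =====

-- B sorts the distinct non-negative selected indices once and iterates each row over that list with an early break, instead of scanning every column with a membership test; alternative algorithm, same values.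


-- ===== PORT A =====
def copy_without_columns (arr : List (List String)) (indices_set : List Int) : List (List String) :=
  (PySem.List.pyRange 1 (arr.length : Int) 1).foldl
    (fun new_table i =>
      let row := PySem.List.pyGetD arr i []
      new_table ++
        [(PySem.List.pyRange 0 (row.length : Int) 1).foldl
          (fun new_row j =>
            if j ∈ indices_set then new_row ++ [PySem.List.pyGetD row j ""] else new_row) []])
    []

-- ===== PORT B =====
def copy_without_columns_alt (arr : List (List String)) (indices_set : List Int) : List (List String) :=
  let kept := (PySem.List.sorted (PySem.Set.ofList indices_set) (fun x => x) false).filter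
    (fun j => decide (0 ≤ j))
  -- the 'for j in kept: if j >= n: break; append(row[j])' loop is the takeWhile of the sorted
  -- kept list followed by the appends (exact: kept is iterated in order and the loop stops at
  -- the first j with n ≤ j)
  (arr.drop 1).map (fun row =>
    (kept.takeWhile (fun j => decide (j < (row.length : Int)))).map
      (fun j => PySem.List.pyGetD row j ""))

-- ===== PRECONDITION & SPEC =====
def Spec_copy_without_columns (arr : List (List String)) (indices_set : List Int) (out : List (List String)) : Prop := out = copy_without_columns_alt arr indices_set
instance (arr : List (List String)) (indices_set : List Int) (out : List (List String)) : Decidable (Spec_copy_without_columns arr indices_set out) := by unfold Spec_copy_without_columns; infer_instance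

-- ===== CLAIM (what is proved, stated in full; the proofs are below) =====
def Claim_equal_copy_without_columns : Prop := ∀ (arr : List (List String)) (indices_set : List Int), Dom_copy_without_columns arr indices_set → Spec_copy_without_columns arr indices_set (copy_without_columns arr indices_set)

-- ===== LEMMAS AND PROOFS =====

-- two strictly increasing Int lists with the same members are equal
theorem pv_eq_of_pairwise_lt (l1 l2 : List Int) (h1 : l1.Pairwise (· < ·))
    (h2 : l2.Pairwise (· < ·)) (hm : ∀ x, x ∈ l1 ↔ x ∈ l2) : l1 = l2 := by
  have n1 : l1.Nodup := h1.imp (fun h => ne_of_lt h)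
  have n2 : l2.Nodup := h2.imp (fun h => ne_of_lt h)
  exact ((List.perm_ext_iff_of_nodup n1 n2).mpr hm).eq_of_pairwise
    (fun a b _ _ hab hba => absurd hba (not_lt_of_gt hab)) h1 h2

-- on a strictly increasing list, stopping at the first too-large element is filtering
theorem pv_takeWhile_eq_filter (n : Int) (l : List Int) (h : l.Pairwise (· < ·)) :
    l.takeWhile (fun j => decide (j < n)) = l.filter (fun j => decide (j < n)) := by
  induction l with
  | nil => rfl
  | cons a t ih =>
    rcases List.pairwise_cons.mp h with ⟨ha, ht⟩
    by_cases hlt : a < n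
    · simp [List.takeWhile_cons, List.filter_cons, hlt, ih ht]
    · have hall : ∀ x ∈ t, ¬ (x < n) := fun x hx hxn => hlt (lt_trans (ha x hx) hxn)
      have hnil : t.filter (fun j => decide (j < n)) = [] :=
        List.filter_eq_nil_iff.mpr (fun x hx => by simpa using hall x hx)
      simp [List.takeWhile_cons, List.filter_cons, hlt, hnil]

-- the inner loops agree on every row
theorem pv_row_eq (inds : List Int) (row : List String) :
    (PySem.List.pyRange 0 (row.length : Int) 1).foldl
      (fun new_row j =>
        if j ∈ inds then new_row ++ [PySem.List.pyGetD row j ""] else new_row) []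
    = (((PySem.List.sorted (PySem.Set.ofList inds) (fun x => x) false).filter
          (fun j => decide (0 ≤ j))).takeWhile
        (fun j => decide (j < (row.length : Int)))).map
        (fun j => PySem.List.pyGetD row j "") := by
  rw [PySem.List.foldl_append_ite (p := fun j => j ∈ inds)
      (f := fun j => PySem.List.pyGetD row j "")]
  rw [List.nil_append]
  rw [pv_takeWhile_eq_filter _ _ ((PySem.List.sorted_ofList_pairwise_lt inds).filter _)]
  congr 1
  apply pv_eq_of_pairwise_lt
  · exact (PySem.List.pairwise_lt_pyRange_one 0 (row.length : Int)).filter _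
  · exact ((PySem.List.sorted_ofList_pairwise_lt inds).filter _).filter _
  · intro x
    simp [List.mem_filter, PySem.List.mem_pyRange_one, PySem.List.mem_sorted,
      PySem.Set.mem_ofList]
    tauto

-- ===== VERDICT (by name: the statement is the Claim_ definition above) =====
theorem copy_without_columns_spec : Claim_equal_copy_without_columns := by
  intro arr inds _
  unfold Spec_copy_without_columns copy_without_columns copy_without_columns_alt
  rw [PySem.List.foldl_pyRange_pyGetD' arr []
      (f := fun new_table row =>
        new_table ++
          [(PySem.List.pyRange 0 (row.length : Int) 1).foldl
            (fun new_row j =>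
              if j ∈ inds then new_row ++ [PySem.List.pyGetD row j ""] else new_row) []])
      (init := []) (a := 1) (by norm_num)]
  rw [PySem.List.foldl_append_singleton_eq_map]
  rw [List.nil_append]
  simp only [Int.toNat_one]
  exact List.map_congr_left (fun row _ => pv_row_eq inds row)
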